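-- pv_equiv track=rewrite | github.com/michaelmross/tasktracker | spike_certify_mp.py | precompute_big_triples_sorted
-- ===== SOURCE A (Python) =====
-- def precompute_big_triples_sorted(Amax: int):
--     vals = range(3, Amax + 1)
--     triples = []
--     for a in vals:
--         for b in vals:
--             for c in vals:
--                 triples.append((a+b+c, (a, b, c)))
--     triples.sort(key=lambda t: t[0])
--     sums = [t[0] for t in triples]
--     return triples, sums
-- ===== SOURCE B (Python) =====
-- def precompute_big_triples_sorted(Amax: int):
--     # Emit triples already ordered by sum: for each sum s, enumerate (a, b)
--     # ascending and take c = s - a - b when it lies in [3, Amax].  This gives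
--     # the same order as a stable sort of the lexicographic generation, with
--     # no sort pass.
--     triples = []
--     for s in range(9, 3 * Amax + 1):
--         for a in range(3, Amax + 1):
--             for b in range(3, Amax + 1):
--                 c = s - a - b
--                 if 3 <= c <= Amax:
--                     triples.append((s, (a, b, c)))
--     sums = [t[0] for t in triples]
--     return triples, sums
-- ===== Notes on version B (the rewrite author's own statement) =====
-- stated objective: faster
-- what changed: B emits the triples already ordered by sum (outer loop over the sum s, then a, b ascending with c = s-a-b range-checked), so the sort pass over all n^3 triples disappears; the tie order within a sum equals the stable sort's lexicographic generation order.
import Mathlib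
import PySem

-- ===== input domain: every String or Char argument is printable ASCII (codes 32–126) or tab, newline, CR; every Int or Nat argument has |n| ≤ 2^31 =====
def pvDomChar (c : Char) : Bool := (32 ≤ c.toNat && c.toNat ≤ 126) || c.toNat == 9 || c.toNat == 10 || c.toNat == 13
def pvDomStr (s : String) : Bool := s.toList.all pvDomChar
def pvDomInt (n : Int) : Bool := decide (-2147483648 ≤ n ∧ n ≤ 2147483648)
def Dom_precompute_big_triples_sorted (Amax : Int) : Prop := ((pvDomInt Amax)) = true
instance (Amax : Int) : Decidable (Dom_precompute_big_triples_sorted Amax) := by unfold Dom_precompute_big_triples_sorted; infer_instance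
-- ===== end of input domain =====

-- B replaces A's build-all-triples-then-stable-sort-by-sum with a direct emission in sum order
-- (outer loop over the sum s, then a, b ascending, c = s - a - b range-checked), removing the sort pass.

-- ===== PORT A =====
def precompute_big_triples_sorted (Amax : Int) : (List (Int × (Int × Int × Int))) × List Int :=
  let vals := PySem.List.pyRange 3 (Amax + 1)
  let triples :=
    vals.foldl (fun acc a =>
      vals.foldl (fun acc b =>
        vals.foldl (fun acc c => acc ++ [(a + b + c, (a, b, c))]) acc) acc) []
  let triples' := PySem.List.sorted triples (fun t => t.1)
  let sums := triples'.map (fun t => t.1)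
  (triples', sums)

-- ===== PORT B =====
def precompute_big_triples_sorted_alt (Amax : Int) : (List (Int × (Int × Int × Int))) × List Int :=
  let triples :=
    (PySem.List.pyRange 9 (3 * Amax + 1)).foldl (fun acc s =>
      (PySem.List.pyRange 3 (Amax + 1)).foldl (fun acc a =>
        (PySem.List.pyRange 3 (Amax + 1)).foldl (fun acc b =>
          if 3 ≤ s - a - b ∧ s - a - b ≤ Amax then acc ++ [(s, (a, b, s - a - b))] else acc) acc) acc) []
  let sums := triples.map (fun t => t.1)
  (triples, sums)

-- ===== PRECONDITION & SPEC =====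
def Spec_precompute_big_triples_sorted (Amax : Int) (out : (List (Int × (Int × Int × Int))) × List Int) : Prop := out = precompute_big_triples_sorted_alt Amax
instance (Amax : Int) (out : (List (Int × (Int × Int × Int))) × List Int) : Decidable (Spec_precompute_big_triples_sorted Amax out) := by unfold Spec_precompute_big_triples_sorted; infer_instance

-- ===== CLAIM (what is proved, stated in full; the proofs are below) =====
def Claim_equal_precompute_big_triples_sorted : Prop := ∀ (Amax : Int), Dom_precompute_big_triples_sorted Amax → Spec_precompute_big_triples_sorted Amax (precompute_big_triples_sorted Amax)

-- ===== LEMMAS AND PROOFS =====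

-- A's raw (unsorted) triple list, as a flatMap.
def pvRaw (A : Int) : List (Int × (Int × Int × Int)) :=
  (PySem.List.pyRange 3 (A + 1)).flatMap (fun a =>
    (PySem.List.pyRange 3 (A + 1)).flatMap (fun b =>
      (PySem.List.pyRange 3 (A + 1)).map (fun c => (a + b + c, (a, b, c)))))

-- B's triple list, as a flatMap.
def pvB (A : Int) : List (Int × (Int × Int × Int)) :=
  (PySem.List.pyRange 9 (3 * A + 1)).flatMap (fun s =>
    (PySem.List.pyRange 3 (A + 1)).flatMap (fun a =>
      (((PySem.List.pyRange 3 (A + 1)).filter (fun b => decide (3 ≤ s - a - b ∧ s - a - b ≤ A))).map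
        (fun b => (s, (a, b, s - a - b))))))

-- the common membership predicate
def pvInR (A : Int) (t : Int × (Int × Int × Int)) : Prop :=
  3 ≤ t.2.1 ∧ t.2.1 ≤ A ∧ 3 ≤ t.2.2.1 ∧ t.2.2.1 ≤ A ∧ 3 ≤ t.2.2.2 ∧ t.2.2.2 ≤ A ∧
    t.1 = t.2.1 + t.2.2.1 + t.2.2.2

-- lexicographic order on the generated triple (a, b, c)
def pvLexT (x y : Int × (Int × Int × Int)) : Prop :=
  x.2.1 < y.2.1 ∨ (x.2.1 = y.2.1 ∧ (x.2.2.1 < y.2.2.1 ∨ (x.2.2.1 = y.2.2.1 ∧ x.2.2.2 < y.2.2.2)))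

-- an injective Int key realising "sum first, then (a,b,c) lexicographically" on in-range triples
def pvK (t : Int × (Int × Int × Int)) : Int :=
  ((t.1 * 17179869184 + t.2.1) * 17179869184 + t.2.2.1) * 17179869184 + t.2.2.2

lemma pv_fold3_eq_raw (A : Int) :
    (PySem.List.pyRange 3 (A + 1)).foldl (fun acc a =>
      (PySem.List.pyRange 3 (A + 1)).foldl (fun acc b =>
        (PySem.List.pyRange 3 (A + 1)).foldl (fun acc c => acc ++ [(a + b + c, (a, b, c))]) acc) acc) []
    = pvRaw A := by
  simp only [PySem.List.foldl_append_singleton_eq_map, PySem.List.foldl_append_eq_flatMap, pvRaw,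
    List.nil_append]

lemma pv_foldB_eq_pvB (A : Int) :
    (PySem.List.pyRange 9 (3 * A + 1)).foldl (fun acc s =>
      (PySem.List.pyRange 3 (A + 1)).foldl (fun acc a =>
        (PySem.List.pyRange 3 (A + 1)).foldl (fun acc b =>
          if 3 ≤ s - a - b ∧ s - a - b ≤ A then acc ++ [(s, (a, b, s - a - b))] else acc) acc) acc) []
    = pvB A := by
  simp only [PySem.List.foldl_append_ite, PySem.List.foldl_append_eq_flatMap, pvB,
    List.nil_append]

lemma pv_mem_raw (A : Int) (t : Int × (Int × Int × Int)) : t ∈ pvRaw A ↔ pvInR A t := by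
  obtain ⟨s, a, b, c⟩ := t
  simp only [pvRaw, List.mem_flatMap, List.mem_map, PySem.List.mem_pyRange_one, pvInR]
  constructor
  · rintro ⟨a', ha, b', hb, c', hc, h⟩
    simp only [Prod.mk.injEq] at h
    omega
  · rintro ⟨h1, h2, h3, h4, h5, h6, h7⟩
    refine ⟨a, by omega, b, by omega, c, by omega, ?_⟩
    rw [h7]

lemma pv_mem_B (A : Int) (t : Int × (Int × Int × Int)) : t ∈ pvB A ↔ pvInR A t := by
  obtain ⟨s, a, b, c⟩ := t
  simp only [pvB, List.mem_flatMap, List.mem_map, List.mem_filter, PySem.List.mem_pyRange_one,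
    pvInR, decide_eq_true_eq]
  constructor
  · rintro ⟨s', hs, a', ha, b', ⟨hb, hc⟩, h⟩
    simp only [Prod.mk.injEq] at h
    omega
  · rintro ⟨h1, h2, h3, h4, h5, h6, h7⟩
    refine ⟨s, by omega, a, by omega, b, ⟨by omega, by omega⟩, ?_⟩
    have hc : s - a - b = c := by omega
    rw [hc]

lemma pv_raw_pairwise (A : Int) : (pvRaw A).Pairwise pvLexT := by
  unfold pvRaw
  rw [List.pairwise_flatMap]
  constructor
  · intro a _
    rw [List.pairwise_flatMap]
    constructor
    · intro b _
      rw [List.pairwise_map]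
      refine (PySem.List.pairwise_lt_pyRange_one _ _).imp ?_
      intro c c' h
      exact Or.inr ⟨rfl, Or.inr ⟨rfl, h⟩⟩
    · refine (PySem.List.pairwise_lt_pyRange_one _ _).imp ?_
      intro b b' h x hx y hy
      simp only [List.mem_map] at hx hy
      obtain ⟨c, _, rfl⟩ := hx; obtain ⟨c', _, rfl⟩ := hy
      exact Or.inr ⟨rfl, Or.inl h⟩
  · refine (PySem.List.pairwise_lt_pyRange_one _ _).imp ?_
    intro a a' h x hx y hy
    simp only [List.mem_flatMap, List.mem_map] at hx hy
    obtain ⟨b, _, c, _, rfl⟩ := hx; obtain ⟨b', _, c', _, rfl⟩ := hy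
    exact Or.inl h

-- the key realises "sum, then lex" on in-range triples (needs the domain bound on A)
lemma pv_K_lt (A : Int) (hA : A ≤ 2147483648) (x y : Int × (Int × Int × Int))
    (hx : pvInR A x) (hy : pvInR A y)
    (h : x.1 < y.1 ∨ (x.1 = y.1 ∧ pvLexT x y)) : pvK x < pvK y := by
  obtain ⟨s, a, b, c⟩ := x; obtain ⟨s', a', b', c'⟩ := y
  simp [pvInR, pvLexT, pvK] at *
  omega

lemma pv_cmp_agree (A : Int) (hA : A ≤ 2147483648) (x y : Int × (Int × Int × Int))
    (hx : pvInR A x) (hy : pvInR A y) (hlex : pvLexT y x) :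
    decide (x.1 < y.1) = decide (pvK x < pvK y) := by
  rcases lt_trichotomy x.1 y.1 with h | h | h
  · simp [h, pv_K_lt A hA x y hx hy (Or.inl h)]
  · have : pvK y < pvK x := pv_K_lt A hA y x hy hx (Or.inr ⟨h.symm, hlex⟩)
    simp; omega
  · have : pvK y < pvK x := pv_K_lt A hA y x hy hx (Or.inl h)
    simp; omega

lemma pv_insertBy_congr {α : Type} (b1 b2 : α → α → Bool) (x : α) (ys : List α)
    (h : ∀ y ∈ ys, b1 x y = b2 x y) :
    PySem.List.insertBy b1 x ys = PySem.List.insertBy b2 x ys := by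
  induction ys with
  | nil => rfl
  | cons y ys ih =>
    have hy := h y (by simp)
    simp only [PySem.List.insertBy, hy]
    by_cases hb : b2 x y = true
    · simp [hb]
    · simp only [Bool.not_eq_true] at hb
      simp [hb, ih (fun z hz => h z (by simp [hz]))]

lemma pv_foldl_insertBy_congr {α : Type} (b1 b2 : α → α → Bool) (xs : List α) (acc : List α)
    (H1 : ∀ x ∈ xs, ∀ y ∈ acc, b1 x y = b2 x y)
    (H2 : xs.Pairwise (fun y x => b1 x y = b2 x y)) :
    xs.foldl (fun acc x => PySem.List.insertBy b1 x acc) acc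
      = xs.foldl (fun acc x => PySem.List.insertBy b2 x acc) acc := by
  induction xs generalizing acc with
  | nil => rfl
  | cons x xs ih =>
    rw [List.pairwise_cons] at H2
    simp only [List.foldl_cons]
    rw [pv_insertBy_congr b1 b2 x acc (H1 x (by simp))]
    exact ih (PySem.List.insertBy b2 x acc)
      (fun z hz y hy => by
        rw [PySem.List.insertBy_mem_iff] at hy
        rcases hy with rfl | hy
        · exact H2.1 z hz
        · exact H1 z (by simp [hz]) y hy)
      H2.2

lemma pv_B_pairwiseK (A : Int) (hA : A ≤ 2147483648) :
    (pvB A).Pairwise (fun x y => pvK x < pvK y) := by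
  have hmemB : ∀ s, ∀ x ∈ (PySem.List.pyRange 3 (A + 1)).flatMap (fun a =>
      (((PySem.List.pyRange 3 (A + 1)).filter (fun b => decide (3 ≤ s - a - b ∧ s - a - b ≤ A))).map
        (fun b => (s, (a, b, s - a - b))))), pvInR A x ∧ x.1 = s := by
    intro s x hx
    simp only [List.mem_flatMap, List.mem_map, List.mem_filter, PySem.List.mem_pyRange_one,
      decide_eq_true_eq] at hx
    obtain ⟨a, ha, b, ⟨hb, hc⟩, rfl⟩ := hx
    refine ⟨?_, rfl⟩
    simp only [pvInR]; omega
  unfold pvB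
  rw [List.pairwise_flatMap]
  constructor
  · intro s hs
    rw [List.pairwise_flatMap]
    constructor
    · intro a ha
      rw [List.pairwise_map]
      refine ((PySem.List.pairwise_lt_pyRange_one _ _).filter _).imp ?_
      intro b b' h
      simp [pvK]
      omega
    · refine (PySem.List.pairwise_lt_pyRange_one _ _).imp ?_
      intro a a' h x hx y hy
      simp only [List.mem_map, List.mem_filter, PySem.List.mem_pyRange_one,
        decide_eq_true_eq] at hx hy
      obtain ⟨b, ⟨hb, hc⟩, rfl⟩ := hx; obtain ⟨b', ⟨hb', hc'⟩, rfl⟩ := hy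
      simp [pvK]
      omega
  · refine (PySem.List.pairwise_lt_pyRange_one _ _).imp ?_
    intro s s' h x hx y hy
    obtain ⟨hxr, hxs⟩ := hmemB s x hx
    obtain ⟨hyr, hys⟩ := hmemB s' y hy
    exact pv_K_lt A hA x y hxr hyr (Or.inl (by omega))

lemma pv_lexT_ne (x y : Int × (Int × Int × Int)) (h : pvLexT x y) : x ≠ y := by
  rintro rfl
  simp only [pvLexT] at h
  omega

lemma pv_perm (A : Int) (hA : A ≤ 2147483648) : (pvB A).Perm (pvRaw A) := by
  have h1 : (pvB A).Nodup :=
    (pv_B_pairwiseK A hA).imp (fun h => by rintro rfl; exact absurd h (lt_irrefl _))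
  have h2 : (pvRaw A).Nodup := (pv_raw_pairwise A).imp (fun h => pv_lexT_ne _ _ h)
  rw [List.perm_ext_iff_of_nodup h1 h2]
  intro t
  rw [pv_mem_raw, pv_mem_B]

lemma pv_sorted_raw (A : Int) (hA : A ≤ 2147483648) :
    PySem.List.sorted (pvRaw A) (fun t => t.1) = pvB A := by
  have step1 : PySem.List.sorted (pvRaw A) (fun t => t.1)
      = PySem.List.sorted (pvRaw A) pvK := by
    rw [PySem.List.sorted_eq_foldl_insertBy, PySem.List.sorted_eq_foldl_insertBy]
    refine pv_foldl_insertBy_congr _ _ _ _ (by simp) ?_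
    refine (pv_raw_pairwise A).imp_of_mem ?_
    intro y x hy hx hlex
    exact pv_cmp_agree A hA x y ((pv_mem_raw A x).mp hx) ((pv_mem_raw A y).mp hy) hlex
  rw [step1]
  exact PySem.List.sorted_eq_of_perm_of_pairwise_lt _ _ _ (pv_perm A hA) (pv_B_pairwiseK A hA)

-- ===== VERDICT (by name: the statement is the Claim_ definition above) =====
theorem precompute_big_triples_sorted_spec : Claim_equal_precompute_big_triples_sorted := by
  intro A hD
  unfold Spec_precompute_big_triples_sorted precompute_big_triples_sorted
    precompute_big_triples_sorted_alt
  have hA : A ≤ 2147483648 := by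
    simp only [Dom_precompute_big_triples_sorted, pvDomInt, decide_eq_true_eq] at hD
    exact hD.2
  simp only [pv_fold3_eq_raw, pv_foldB_eq_pvB, pv_sorted_raw A hA]
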